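-- pv_equiv track=rewrite | github.com/ArneBab/peersim-generic-DHT-analysis | analysis/lib/actions/anonymity_accuracy_metrics.py | _get_relative_rank_count
-- ===== SOURCE A (Python) =====
-- def _get_relative_rank_count(ranked_set, source_node_id):
--     sorted_rank = sorted(ranked_set.keys())
--     rank_count = 1
--     for rank in sorted_rank:
--         if source_node_id in ranked_set[rank]:
--             return rank_count
--         rank_count += 1
--     return 0
-- ===== SOURCE B (Python) =====
-- def _get_relative_rank_count(ranked_set, source_node_id):
--     containing = [k for k in ranked_set if source_node_id in ranked_set[k]]
--     if not containing:
--         return 0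
--     m = min(containing)
--     return 1 + sum(1 for k in ranked_set if k < m)
-- ===== Notes on version B (the rewrite author's own statement) =====
-- stated objective: faster
-- what changed: B drops the sort entirely: it collects the keys whose set contains the node id, takes their minimum, and counts keys strictly below it in one pass, instead of sorting all keys and scanning them in order.
import Mathlib
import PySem

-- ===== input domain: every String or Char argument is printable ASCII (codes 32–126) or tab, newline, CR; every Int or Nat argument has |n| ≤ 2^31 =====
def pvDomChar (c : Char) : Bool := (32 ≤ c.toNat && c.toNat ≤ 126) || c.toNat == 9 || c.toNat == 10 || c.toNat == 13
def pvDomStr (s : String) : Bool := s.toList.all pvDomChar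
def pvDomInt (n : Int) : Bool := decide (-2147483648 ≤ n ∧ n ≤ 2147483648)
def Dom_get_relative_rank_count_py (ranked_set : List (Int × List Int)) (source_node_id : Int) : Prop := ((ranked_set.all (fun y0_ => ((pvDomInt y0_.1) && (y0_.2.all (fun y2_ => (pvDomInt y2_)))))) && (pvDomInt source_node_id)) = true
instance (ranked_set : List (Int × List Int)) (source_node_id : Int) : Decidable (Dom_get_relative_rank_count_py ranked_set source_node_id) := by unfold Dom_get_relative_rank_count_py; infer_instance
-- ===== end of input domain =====

-- B replaces A's sort-then-scan by: collect the containing keys, take their minimum,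
-- and count keys strictly below it (objective: faster, no sort).

-- ===== PORT A =====
-- the 'for rank in sorted_rank: … return rank_count; rank_count += 1' loop with early return
def rankLoopA (d : PySem.Dict Int (List Int)) (sid : Int) : List Int → Int → Int
  | [], _ => 0
  | r :: t, c => if (d.getD r []).contains sid then c else rankLoopA d sid t (c + 1)

def get_relative_rank_count_py (ranked_set : List (Int × List Int)) (source_node_id : Int) : Int :=
  let d := PySem.Dict.ofList ranked_set
  let sorted_rank := PySem.List.sorted d.keys (fun x => x) false
  rankLoopA d source_node_id sorted_rank 1

-- ===== PORT B =====
def get_relative_rank_count_py_alt (ranked_set : List (Int × List Int)) (source_node_id : Int) : Int :=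
  let d := PySem.Dict.ofList ranked_set
  let containing := d.keys.filter (fun k => (d.getD k []).contains source_node_id)
  match PySem.List.min? containing (fun x => x) with
  | none => 0
  | some m => 1 + d.keys.foldl (fun acc k => if k < m then acc + 1 else acc) 0

-- ===== PRECONDITION & SPEC =====
def Spec_get_relative_rank_count_py (ranked_set : List (Int × List Int)) (source_node_id : Int) (out : Int) : Prop := out = get_relative_rank_count_py_alt ranked_set source_node_id
instance (ranked_set : List (Int × List Int)) (source_node_id : Int) (out : Int) : Decidable (Spec_get_relative_rank_count_py ranked_set source_node_id out) := by unfold Spec_get_relative_rank_count_py; infer_instance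

-- ===== CLAIM (what is proved, stated in full; the proofs are below) =====
def Claim_equal_get_relative_rank_count_py : Prop := ∀ (ranked_set : List (Int × List Int)) (source_node_id : Int), Dom_get_relative_rank_count_py ranked_set source_node_id → Spec_get_relative_rank_count_py ranked_set source_node_id (get_relative_rank_count_py ranked_set source_node_id)

-- ===== LEMMAS AND PROOFS =====

-- On a strictly increasing list, A's counting loop equals "min of the satisfying keys,
-- plus the number of keys strictly below it".
theorem rankLoopA_char (d : PySem.Dict Int (List Int)) (sid : Int) :
    ∀ (l : List Int), l.Pairwise (· < ·) → ∀ (c : Int),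
    rankLoopA d sid l c =
      match PySem.List.min? (l.filter (fun k => (d.getD k []).contains sid)) (fun x => x) with
      | none => 0
      | some m => c + (l.countP (fun x => decide (x < m)) : Int) := by
  intro l
  induction l with
  | nil => intro _ c; simp [rankLoopA, PySem.List.min?]
  | cons a t ih =>
    intro hp c
    have ha : ∀ x ∈ t, a < x := fun x hx => (List.pairwise_cons.mp hp).1 x hx
    have hpt : t.Pairwise (· < ·) := (List.pairwise_cons.mp hp).2
    by_cases hpa : (d.getD a []).contains sid = true
    · -- first element already satisfies: loop returns c, min is a, count below a is 0
      have hpa' : sid ∈ d.getD a [] := by simpa using hpa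
      have hfil : (a :: t).filter (fun k => (d.getD k []).contains sid)
          = a :: t.filter (fun k => (d.getD k []).contains sid) := by
        simp [hpa']
      rw [hfil]
      cases hmin : PySem.List.min? (a :: t.filter (fun k => (d.getD k []).contains sid)) (fun x : Int => x) with
      | none =>
        have : a :: t.filter (fun k => (d.getD k []).contains sid) = [] :=
          (PySem.List.min?_eq_none_iff _ _).mp hmin
        exact absurd this (by simp)
      | some w =>
        have hmem : w ∈ a :: t.filter (fun k => (d.getD k []).contains sid) :=
          PySem.List.min?_mem hmin
        have hle : w ≤ a := PySem.List.min?_isMin hmin a (by simp)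
        have hwa : w = a := by
          rcases List.mem_cons.mp hmem with h | h
          · exact h
          · exact absurd hle (not_le.mpr (ha w (List.mem_of_mem_filter h)))
        have hcount : (a :: t).countP (fun x => decide (x < w)) = 0 := by
          rw [List.countP_eq_zero]
          intro x hx
          rcases List.mem_cons.mp hx with h | h
          · simp [h, hwa]
          · simp [hwa, not_lt.mpr (le_of_lt (ha x h))]
        simp [rankLoopA, hpa', hcount]
    · -- first element fails: step on, and every later minimum m satisfies a < m
      have hpa' : sid ∉ d.getD a [] := by simpa using hpa
      have hfil : (a :: t).filter (fun k => (d.getD k []).contains sid)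
          = t.filter (fun k => (d.getD k []).contains sid) := by
        simp [hpa']
      rw [show rankLoopA d sid (a :: t) c = rankLoopA d sid t (c + 1) by
            simp [rankLoopA, hpa'], ih hpt (c + 1), hfil]
      cases hmin : PySem.List.min? (t.filter (fun k => (d.getD k []).contains sid)) (fun x : Int => x) with
      | none => rfl
      | some m =>
        have hm : a < m := ha m (List.mem_of_mem_filter (PySem.List.min?_mem hmin))
        have hcount : (a :: t).countP (fun x => decide (x < m))
            = t.countP (fun x => decide (x < m)) + 1 := by
          simp [hm]
        simp only [hcount]
        push_cast
        ring

-- the minimum (under the identity key) depends only on the multiset of elements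
theorem min?_id_perm {l₁ l₂ : List Int} (hperm : l₁.Perm l₂) :
    PySem.List.min? l₁ (fun x : Int => x) = PySem.List.min? l₂ (fun x : Int => x) := by
  cases h1 : PySem.List.min? l₁ (fun x : Int => x) with
  | none =>
    have h := (PySem.List.min?_eq_none_iff l₁ (fun x : Int => x)).mp h1
    subst h
    rw [(PySem.List.min?_eq_none_iff l₂ (fun x : Int => x)).mpr (List.Perm.eq_nil hperm.symm)]
  | some m₁ =>
    cases h2 : PySem.List.min? l₂ (fun x : Int => x) with
    | none =>
      have h := (PySem.List.min?_eq_none_iff l₂ (fun x : Int => x)).mp h2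
      subst h
      rw [(PySem.List.min?_eq_none_iff l₁ (fun x : Int => x)).mpr (List.Perm.eq_nil hperm)] at h1
      exact absurd h1 (by simp)
    | some m₂ =>
      have hm1 := PySem.List.min?_mem h1
      have hm2 := PySem.List.min?_mem h2
      have hle1 := PySem.List.min?_isMin h1 m₂ (hperm.mem_iff.mpr hm2)
      have hle2 := PySem.List.min?_isMin h2 m₁ (hperm.mem_iff.mp hm1)
      have : m₁ = m₂ := le_antisymm hle1 hle2
      rw [this]

-- ===== VERDICT (by name: the statement is the Claim_ definition above) =====
theorem get_relative_rank_count_py_spec : Claim_equal_get_relative_rank_count_py := by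
  intro ranked_set source_node_id _
  unfold Spec_get_relative_rank_count_py get_relative_rank_count_py get_relative_rank_count_py_alt
  show rankLoopA (PySem.Dict.ofList ranked_set) source_node_id
        (PySem.List.sorted (PySem.Dict.ofList ranked_set).keys (fun x => x) false) 1
      = match PySem.List.min?
            ((PySem.Dict.ofList ranked_set).keys.filter
              (fun k => ((PySem.Dict.ofList ranked_set).getD k []).contains source_node_id)) (fun x => x) with
        | none => 0
        | some m => 1 + (PySem.Dict.ofList ranked_set).keys.foldl
            (fun acc k => if k < m then acc + 1 else acc) 0
  generalize hD : PySem.Dict.ofList ranked_set = d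
  have hnodup : d.keys.Nodup := by rw [← hD]; exact PySem.Dict.nodup_keys_ofList ranked_set
  have hperm : (PySem.List.sorted d.keys (fun x => x) false).Perm d.keys :=
    PySem.List.sorted_perm d.keys (fun x => x) false
  have hsorted_nodup : (PySem.List.sorted d.keys (fun x => x) false).Nodup :=
    hperm.nodup_iff.mpr hnodup
  have hpw : (PySem.List.sorted d.keys (fun x => x) false).Pairwise (· < ·) := by
    have hle : (PySem.List.sorted d.keys (fun x => x) false).Pairwise (fun a b : Int => a ≤ b) :=
      PySem.List.sorted_pairwise d.keys (fun x => x)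
    exact (hle.and hsorted_nodup).imp (fun h => lt_of_le_of_ne h.1 h.2)
  rw [rankLoopA_char d source_node_id _ hpw 1,
      min?_id_perm (hperm.filter (fun k => (d.getD k []).contains source_node_id))]
  cases hmin : PySem.List.min?
      (d.keys.filter (fun k => (d.getD k []).contains source_node_id)) (fun x : Int => x) with
  | none => rfl
  | some m =>
    show 1 + ((PySem.List.sorted d.keys (fun x => x) false).countP (fun x => decide (x < m)) : Int)
        = 1 + List.foldl (fun acc k => if k < m then acc + 1 else acc) 0 d.keys
    rw [PySem.List.foldl_ite_add_one (fun k : Int => k < m) d.keys 0,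
        List.Perm.countP_eq _ hperm]
    ring
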